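-- pv_equiv track=rewrite | github.com/vann10/TBA-DFA-NFA | models/function3.py | find_equivalent_groups
-- ===== SOURCE A (Python) =====
-- def find_equivalent_groups(distinguishable, states):
--     """Mencari grup-grup state yang equivalent"""
--     groups = []
--     processed = set()
--
--     for state in states:
--         if state not in processed:
--             group = [state]
--             processed.add(state)
--
--             for other_state in states:
--                 if other_state not in processed:
--                     pair = (min(state, other_state), max(state, other_state))
--                     if pair not in distinguishable or not distinguishable[pair]:
--                         group.append(other_state)
--                         processed.add(other_state)
--
--             groups.append(group)
--
--     return groups
-- ===== SOURCE B (Python) =====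
-- def find_equivalent_groups(distinguishable, states):
--     """Mencari grup-grup state yang equivalent"""
--     def compat(a, b):
--         pair = (min(a, b), max(a, b))
--         return pair not in distinguishable or not distinguishable[pair]
--
--     def go(xs):
--         if not xs:
--             return []
--         s, rest = xs[0], xs[1:]
--         group = [s] + [t for t in rest if compat(s, t)]
--         remaining = [t for t in rest if not compat(s, t)]
--         return [group] + go(remaining)
--
--     return go(list(dict.fromkeys(states)))
-- ===== Notes on version B (the rewrite author's own statement) =====
-- stated objective: simpler
-- what changed: Replaces the nested loops over the full state list with a mutable processed set by a first-occurrence dedup followed by a structural partition-and-recurse (take the first remaining state, split the rest into its group and the residue, recurse on the residue), eliminating the processed set entirely.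
import Mathlib
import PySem

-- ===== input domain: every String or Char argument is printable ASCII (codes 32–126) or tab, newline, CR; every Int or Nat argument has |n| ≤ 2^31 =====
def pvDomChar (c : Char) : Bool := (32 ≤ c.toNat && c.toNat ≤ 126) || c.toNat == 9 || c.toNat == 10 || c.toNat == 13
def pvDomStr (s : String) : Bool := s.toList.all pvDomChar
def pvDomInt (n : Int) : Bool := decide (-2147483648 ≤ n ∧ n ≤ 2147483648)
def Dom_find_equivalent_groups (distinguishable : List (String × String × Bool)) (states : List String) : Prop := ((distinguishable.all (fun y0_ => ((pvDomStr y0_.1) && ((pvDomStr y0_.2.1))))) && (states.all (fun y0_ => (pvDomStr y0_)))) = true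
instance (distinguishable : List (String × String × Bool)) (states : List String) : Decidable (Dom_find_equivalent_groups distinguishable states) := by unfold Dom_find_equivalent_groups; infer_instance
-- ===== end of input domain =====

-- B replaces A's nested scans with a mutable processed set by a first-occurrence dedup followed by
-- partition-and-recurse on the remaining states; same result, simpler structure (no processed set).


-- ===== PORT A =====
-- `pair in distinguishable` / `distinguishable[pair]`: first-match lookup of the (min,max) key;
-- shared by both ports because both Python versions contain this identical pair test.
def pvPairGet? (d : List (String × String × Bool)) (a b : String) : Option Bool :=
  match d with
  | [] => none
  | (x, y, v) :: rest => if x = a ∧ y = b then some v else pvPairGet? rest a b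

-- `pair = (min(s,t), max(s,t)); pair not in distinguishable or not distinguishable[pair]`
def pvCompat (d : List (String × String × Bool)) (s t : String) : Bool :=
  let a := if s ≤ t then s else t
  let b := if s ≤ t then t else s
  match pvPairGet? d a b with
  | none => true
  | some v => !v

-- body of A's inner `for other_state in states:` loop
def pvAInner (d : List (String × String × Bool)) (state : String)
    (gp : List String × PySem.Set String) (other : String) : List String × PySem.Set String :=
  if other ∈ gp.2 then gp
  else if pvCompat d state other then (gp.1 ++ [other], PySem.Set.add gp.2 other)
  else gp

-- body of A's outer `for state in states:` loop
def pvAOuter (d : List (String × String × Bool)) (states : List String)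
    (acc : List (List String) × PySem.Set String) (state : String) :
    List (List String) × PySem.Set String :=
  if state ∈ acc.2 then acc
  else
    let r := states.foldl (pvAInner d state) ([state], PySem.Set.add acc.2 state)
    (acc.1 ++ [r.1], r.2)

def find_equivalent_groups (distinguishable : List (String × String × Bool)) (states : List String) : List (List String) :=
  (states.foldl (pvAOuter distinguishable states) ([], PySem.Set.empty)).1

-- ===== PORT B =====
-- Source B's `go`: take the first remaining state, split the rest into its group and the residue, recurse.
def pvBGo (d : List (String × String × Bool)) (xs : List String) : List (List String) :=
  match xs with
  | [] => []
  | s :: rest =>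
      (s :: rest.filter (fun t => pvCompat d s t)) :: pvBGo d (rest.filter (fun t => !pvCompat d s t))
termination_by xs.length
decreasing_by
  have h := List.length_filter_le (fun x : {x // x ∈ rest} => !pvCompat d s x.1) rest.attach
  simp at h ⊢
  omega

def find_equivalent_groups_alt (distinguishable : List (String × String × Bool)) (states : List String) : List (List String) :=
  pvBGo distinguishable (PySem.List.dedup states)

-- ===== PRECONDITION & SPEC =====
def Spec_find_equivalent_groups (distinguishable : List (String × String × Bool)) (states : List String) (out : List (List String)) : Prop := out = find_equivalent_groups_alt distinguishable states
instance (distinguishable : List (String × String × Bool)) (states : List String) (out : List (List String)) : Decidable (Spec_find_equivalent_groups distinguishable states out) := by unfold Spec_find_equivalent_groups; infer_instance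

-- ===== CLAIM (what is proved, stated in full; the proofs are below) =====
def Claim_equal_find_equivalent_groups : Prop := ∀ (distinguishable : List (String × String × Bool)) (states : List String), Dom_find_equivalent_groups distinguishable states → Spec_find_equivalent_groups distinguishable states (find_equivalent_groups distinguishable states)

-- ===== LEMMAS AND PROOFS =====

-- first-occurrence dedup of `xs` relative to an already-seen list `p` (membership-only use of `p`)
def pvDf (p : List String) : List String → List String
  | [] => []
  | x :: xs => if x ∈ p then pvDf p xs else x :: pvDf (p ++ [x]) xs

theorem pvDf_congr (p q : List String) (h : ∀ y, y ∈ p ↔ y ∈ q) :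
    ∀ xs, pvDf p xs = pvDf q xs := by
  intro xs
  induction xs generalizing p q with
  | nil => rfl
  | cons x xs ih =>
      simp only [pvDf]
      by_cases hx : x ∈ p
      · rw [if_pos hx, if_pos ((h x).1 hx)]; exact ih p q h
      · rw [if_neg hx, if_neg (fun hq => hx ((h x).2 hq))]
        have : ∀ y, y ∈ p ++ [x] ↔ y ∈ q ++ [x] := by
          intro y; simp [h y]
        rw [ih _ _ this]

theorem pvDf_mem (p : List String) : ∀ xs x, x ∈ pvDf p xs → x ∉ p := by
  intro xs
  induction xs generalizing p with
  | nil => intro x hx; simp [pvDf] at hx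
  | cons z zs ih =>
      intro x hx
      simp only [pvDf] at hx
      by_cases hz : z ∈ p
      · rw [if_pos hz] at hx; exact ih p x hx
      · rw [if_neg hz] at hx
        rcases List.mem_cons.1 hx with rfl | hx
        · exact hz
        · intro hp
          exact ih _ x hx (by simp [hp])

theorem pvDf_superset (p q : List String) (h : ∀ y, y ∈ p → y ∈ q) :
    ∀ xs, pvDf q xs = (pvDf p xs).filter (fun y => !(decide (y ∈ q))) := by
  intro xs
  induction xs generalizing p q with
  | nil => rfl
  | cons x xs ih =>
      simp only [pvDf]
      by_cases hq : x ∈ q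
      · rw [if_pos hq]
        by_cases hp : x ∈ p
        · rw [if_pos hp]; exact ih p q h
        · rw [if_neg hp]
          rw [List.filter_cons_of_neg (by simp [hq])]
          refine ih (p ++ [x]) q ?_
          intro y hy
          rcases List.mem_append.1 hy with hy | hy
          · exact h y hy
          · simpa [List.mem_singleton.1 hy] using hq
      · have hp : x ∉ p := fun hp => hq (h x hp)
        rw [if_neg hq, if_neg hp]
        rw [List.filter_cons_of_pos (by simp [hq])]
        have hmono : ∀ y, y ∈ p ++ [x] → y ∈ q ++ [x] := by
          intro y hy
          rcases List.mem_append.1 hy with hy | hy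
          exacts [List.mem_append.2 (Or.inl (h y hy)), List.mem_append.2 (Or.inr hy)]
        rw [ih (p ++ [x]) (q ++ [x]) hmono]
        congr 1
        apply List.filter_congr
        intro y hy
        have hyx : y ∉ p ++ [x] := pvDf_mem _ _ _ hy
        have : y ≠ x := fun h' => hyx (by simp [h'])
        simp [this]

theorem pvFoldl_add_eq_df (xs : List String) :
    ∀ s : List String, xs.foldl PySem.Set.add s = s ++ pvDf s xs := by
  induction xs with
  | nil => intro s; simp [pvDf]
  | cons x xs ih =>
      intro s
      simp only [List.foldl_cons, pvDf]
      by_cases hx : x ∈ s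
      · rw [if_pos hx]
        have : PySem.Set.add s x = s := by
          simp [PySem.Set.add, hx]
        rw [this, ih s]
      · rw [if_neg hx]
        have : PySem.Set.add s x = s ++ [x] := by
          simp [PySem.Set.add, hx]
        rw [this, ih (s ++ [x]), List.append_assoc]
        simp

theorem pvDf_nil_eq_dedup (xs : List String) : pvDf [] xs = PySem.List.dedup xs := by
  rw [PySem.List.dedup_eq_ofList, PySem.Set.ofList_eq_foldl, pvFoldl_add_eq_df]
  simp

-- membership of PySem.Set.add, as needed below
theorem pvMem_add (p : PySem.Set String) (z x : String) :
    x ∈ PySem.Set.add p z ↔ x ∈ p ∨ x = z := by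
  simp only [PySem.Set.add]
  by_cases h : z ∈ p
  · rw [if_pos (show p.contains z = true from List.contains_iff_mem.2 h)]
    constructor
    · exact Or.inl
    · rintro (hx | rfl)
      · exact hx
      · exact h
  · rw [if_neg (show ¬ p.contains z = true from fun hh => h (List.contains_iff_mem.1 hh))]
    simp

-- A's inner loop: group collects, in order, the still-unprocessed deduped states compatible with `state`
theorem pvInnerL (d : List (String × String × Bool)) (state : String) :
    ∀ (zs : List String) (g : List String) (p : PySem.Set String),
      (zs.foldl (pvAInner d state) (g, p)).1
        = g ++ (pvDf p zs).filter (fun t => pvCompat d state t)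
      ∧ ∀ x, x ∈ (zs.foldl (pvAInner d state) (g, p)).2
        ↔ x ∈ p ∨ x ∈ (pvDf p zs).filter (fun t => pvCompat d state t) := by
  intro zs
  induction zs with
  | nil => intro g p; simp [pvDf]
  | cons z zs ih =>
      intro g p
      simp only [List.foldl_cons, pvAInner, pvDf]
      by_cases hz : z ∈ p
      · rw [if_pos hz, if_pos hz]
        exact ⟨(ih g p).1, (ih g p).2⟩
      · rw [if_neg hz, if_neg hz]
        by_cases hc : pvCompat d state z
        · rw [if_pos hc]
          obtain ⟨h1, h2⟩ := ih (g ++ [z]) (PySem.Set.add p z)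
          have hdf : pvDf (PySem.Set.add p z) zs = pvDf (p ++ [z]) zs := by
            apply pvDf_congr
            intro y; rw [pvMem_add]; simp
          constructor
          · rw [h1, hdf, List.filter_cons_of_pos (by simpa using hc)]
            simp
          · intro x
            rw [h2 x, pvMem_add, hdf, List.filter_cons_of_pos (by simpa using hc)]
            simp only [List.mem_cons]
            tauto
        · rw [if_neg hc]
          obtain ⟨h1, h2⟩ := ih g p
          have hfe : (pvDf (p ++ [z]) zs).filter (fun t => pvCompat d state t)
              = (pvDf p zs).filter (fun t => pvCompat d state t) := by
            rw [pvDf_superset p (p ++ [z]) (by intro y hy; simp [hy]) zs]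
            rw [List.filter_filter]
            apply List.filter_congr
            intro y hy
            have hyp : y ∉ p := pvDf_mem _ _ _ hy
            by_cases hyz : y = z
            · subst hyz; simp [hc]
            · simp [hyp, hyz]
          rw [List.filter_cons_of_neg (by simpa using hc), hfe]
          exact ⟨h1, h2⟩

-- A's outer loop, related to B's recursion through the deduped unprocessed suffix
theorem pvOuterL (d : List (String × String × Bool)) (states : List String) :
    ∀ (ys : List String) (groups : List (List String)) (p : PySem.Set String),
      pvDf p states = pvDf p ys →
      (ys.foldl (pvAOuter d states) (groups, p)).1 = groups ++ pvBGo d (pvDf p ys) := by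
  intro ys
  induction ys with
  | nil => intro groups p _; rw [pvBGo.eq_def]; simp [pvDf]
  | cons s ys ih =>
      intro groups p hinv
      simp only [List.foldl_cons, pvAOuter]
      by_cases hs : s ∈ p
      · rw [if_pos hs]
        have : pvDf p (s :: ys) = pvDf p ys := by simp [pvDf, hs]
        rw [this] at hinv ⊢
        exact ih groups p hinv
      · rw [if_neg hs]
        obtain ⟨h1, h2⟩ := pvInnerL d s states [s] (PySem.Set.add p s)
        have hadd : pvDf (PySem.Set.add p s) states = pvDf (p ++ [s]) states := by
          apply pvDf_congr; intro y; rw [pvMem_add]; simp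
        have hys : pvDf p (s :: ys) = s :: pvDf (p ++ [s]) ys := by simp [pvDf, hs]
        have hsuf : pvDf (p ++ [s]) states = pvDf (p ++ [s]) ys := by
          rw [pvDf_superset p (p ++ [s]) (by intro y hy; simp [hy]) states, hinv, hys]
          rw [List.filter_cons_of_neg (by simp)]
          refine List.filter_eq_self.2 ?_
          intro a ha
          simp [pvDf_mem _ _ _ ha]
        set u := pvDf (p ++ [s]) ys with hu
        set c := fun t => pvCompat d s t with hcdef
        have hgroup : (states.foldl (pvAInner d s) ([s], PySem.Set.add p s)).1
            = s :: u.filter c := by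
          rw [h1, hadd, hsuf]
          simp
        set p' := (states.foldl (pvAInner d s) ([s], PySem.Set.add p s)).2 with hp'
        have hp'mem : ∀ x, x ∈ p' ↔ x ∈ p ++ [s] ∨ x ∈ u.filter c := by
          intro x
          rw [h2 x, pvMem_add, hadd, hsuf]
          simp only [List.mem_append, List.mem_singleton]
        -- the still-unprocessed deduped states after this group are u.filter (!c)
        have hrest : ∀ zs, pvDf (p ++ [s]) states = pvDf (p ++ [s]) zs →
            pvDf p' zs = u.filter (fun t => !c t) := by
          intro zs hzs
          have h1' : pvDf p' zs = pvDf (p ++ [s] ++ u.filter c) zs := by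
            apply pvDf_congr
            intro y; rw [hp'mem y]; simp only [List.mem_append]
          rw [h1', pvDf_superset (p ++ [s]) (p ++ [s] ++ u.filter c)
                (by intro y hy; simp only [List.mem_append] at hy ⊢; tauto) zs,
              ← hzs, hsuf]
          apply List.filter_congr
          intro y hy
          have hyp : y ∉ p ++ [s] := pvDf_mem _ _ _ hy
          have hiff : y ∈ p ++ [s] ++ List.filter c u ↔ c y = true := by
            constructor
            · intro h0
              rcases List.mem_append.1 h0 with h0 | h0
              · exact absurd h0 hyp
              · exact (List.mem_filter.1 h0).2
            · intro hc0
              exact List.mem_append.2 (Or.inr (List.mem_filter.2 ⟨hy, hc0⟩))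
          have hd : decide (y ∈ p ++ [s] ++ List.filter c u) = c y := by
            cases hc0 : c y with
            | true => exact decide_eq_true (hiff.2 hc0)
            | false =>
                refine decide_eq_false (fun hm => ?_)
                rw [hiff.1 hm] at hc0
                cases hc0
          show (!decide (y ∈ p ++ [s] ++ List.filter c u)) = !c y
          rw [hd]
        have hinv' : pvDf p' states = pvDf p' ys := by
          rw [hrest states rfl, hrest ys hsuf]
        rw [ih (groups ++ [(states.foldl (pvAInner d s) ([s], PySem.Set.add p s)).1]) p' hinv']
        rw [hrest ys hsuf, hgroup, hys]
        conv_rhs => rw [pvBGo.eq_def]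
        simp [hcdef]

-- ===== VERDICT (by name: the statement is the Claim_ definition above) =====
theorem find_equivalent_groups_spec : Claim_equal_find_equivalent_groups := by
  intro d states _
  show find_equivalent_groups d states = find_equivalent_groups_alt d states
  unfold find_equivalent_groups find_equivalent_groups_alt
  have := pvOuterL d states states [] PySem.Set.empty (by rfl)
  rw [this]
  rw [show (PySem.Set.empty : PySem.Set String) = ([] : List String) from rfl]
  rw [pvDf_nil_eq_dedup]
  simp
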